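-- pv_equiv track=rewrite | github.com/FlasHGT/University | Software engineering/Laboratory tasks/B1/uni_lab_b1.py | returnValueSum
-- ===== SOURCE A (Python) =====
-- def returnValueSum (mainValue, pairValue, pairSumValue):
--     for x in range(1, pairValue):# We don't check if x == pairValue (pairValue + 1), because the task says,
--         # that a/b has to be equal to the divider bSum/aSum without the b/a value
--         if (pairValue % x == 0):
--             pairSumValue += x;
--
--     if (mainValue == pairSumValue):
--         return True;
--     else:
--         return False;
-- ===== SOURCE B (Python) =====
-- def returnValueSum(mainValue, pairValue, pairSumValue):
--     # Sum proper divisors of pairValue in O(sqrt(n)) by pairing d with pairValue // d.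
--     n = pairValue
--     total = pairSumValue
--     d = 1
--     while d * d <= n:
--         if n % d == 0:
--             if d < n:
--                 total += d
--             q = n // d
--             if q != d and q < n:
--                 total += q
--         d += 1
--     return mainValue == total
-- ===== Notes on version B (the rewrite author's own statement) =====
-- stated objective: faster
-- what changed: Replaces the O(n) scan over all x in [1,n) with an O(sqrt n) loop that pairs each divisor d <= sqrt(n) with its cofactor n//d.
import Mathlib
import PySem

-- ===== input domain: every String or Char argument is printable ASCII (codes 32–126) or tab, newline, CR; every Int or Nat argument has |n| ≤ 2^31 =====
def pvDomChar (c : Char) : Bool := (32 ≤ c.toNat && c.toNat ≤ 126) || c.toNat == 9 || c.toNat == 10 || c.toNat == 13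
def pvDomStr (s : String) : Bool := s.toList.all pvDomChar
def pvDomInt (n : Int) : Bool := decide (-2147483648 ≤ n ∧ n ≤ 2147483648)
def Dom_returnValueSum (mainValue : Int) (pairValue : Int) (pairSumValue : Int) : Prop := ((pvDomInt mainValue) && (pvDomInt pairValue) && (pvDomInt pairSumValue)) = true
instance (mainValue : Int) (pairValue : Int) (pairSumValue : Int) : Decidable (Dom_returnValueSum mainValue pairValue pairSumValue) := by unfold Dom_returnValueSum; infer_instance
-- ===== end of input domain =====

-- B sums the proper divisors of pairValue by pairing each divisor d ≤ √n with its cofactor n // d (objective: faster).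

-- ===== PORT A =====
def returnValueSum (mainValue : Int) (pairValue : Int) (pairSumValue : Int) : Bool :=
  let pairSumValue :=
    (PySem.List.pyRange 1 pairValue 1).foldl
      (fun acc x => if PySem.Int.mod pairValue x = 0 then acc + x else acc) pairSumValue
  if mainValue == pairSumValue then true else false

-- ===== PORT B =====
-- the while loop of Source B: d increases while d * d ≤ n
def rvsAltLoop (n : Int) (d : Int) (total : Int) : Int :=
  if _h : d * d ≤ n then
    let total :=
      if PySem.Int.mod n d = 0 then
        let t1 := if d < n then total + d else total
        let q := PySem.Int.floordiv n d
        if q ≠ d ∧ q < n then t1 + q else t1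
      else total
    rvsAltLoop n (d + 1) total
  else total
termination_by (n + 1 - d).toNat
decreasing_by
  have hdn : d ≤ n := by nlinarith [mul_self_nonneg (d - 1), mul_self_nonneg d]
  omega

def returnValueSum_alt (mainValue : Int) (pairValue : Int) (pairSumValue : Int) : Bool :=
  mainValue == rvsAltLoop pairValue 1 pairSumValue

-- ===== PRECONDITION & SPEC =====
def Spec_returnValueSum (mainValue : Int) (pairValue : Int) (pairSumValue : Int) (out : Bool) : Prop := out = returnValueSum_alt mainValue pairValue pairSumValue
instance (mainValue : Int) (pairValue : Int) (pairSumValue : Int) (out : Bool) : Decidable (Spec_returnValueSum mainValue pairValue pairSumValue out) := by unfold Spec_returnValueSum; infer_instance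

-- ===== CLAIM (what is proved, stated in full; the proofs are below) =====
def Claim_equal_returnValueSum : Prop := ∀ (mainValue : Int) (pairValue : Int) (pairSumValue : Int), Dom_returnValueSum mainValue pairValue pairSumValue → Spec_returnValueSum mainValue pairValue pairSumValue (returnValueSum mainValue pairValue pairSumValue)

-- ===== LEMMAS AND PROOFS =====

-- per-divisor contribution of B's loop, in Nat form
def rvsG (m d : Nat) : Int :=
  if d ∣ m then
    (if d < m then (d : Int) else 0) +
    (if ¬(m / d = d) ∧ m / d < m then ((m / d : Nat) : Int) else 0)
  else 0

-- A's fold adds f x = ite (x ∣ n) x 0 over the range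
theorem rvsA_sum (n : Int) (ps : Int) :
    (PySem.List.pyRange 1 n 1).foldl
      (fun acc x => if PySem.Int.mod n x = 0 then acc + x else acc) ps
    = ps + ((PySem.List.pyRange 1 n 1).map
        (fun x => if PySem.Int.mod n x = 0 then x else 0)).sum := by
  have h : (fun (acc : Int) (x : Int) => if PySem.Int.mod n x = 0 then acc + x else acc)
      = fun acc x => acc + (if PySem.Int.mod n x = 0 then x else 0) := by
    funext acc x; split <;> simp
  rw [h, PySem.List.foldl_add]

-- the range sum as a Finset sum over Nat
theorem rvsA_finset (n : Int) (hn : 1 ≤ n) :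
    ((PySem.List.pyRange 1 n 1).map
        (fun x => if PySem.Int.mod n x = 0 then x else 0)).sum
    = ∑ x ∈ Finset.Ico 1 n.toNat, (if x ∣ n.toNat then (x : Int) else 0) := by
  have key : ∀ b : Nat,
      ((PySem.List.pyRange 1 (b : Int) 1).map
          (fun x => if PySem.Int.mod n x = 0 then x else 0)).sum
      = ∑ x ∈ Finset.Ico 1 b, (if x ∣ n.toNat then (x : Int) else 0) := by
    intro b
    induction b with
    | zero =>
      rw [PySem.List.pyRange_one_eq_nil (by norm_num)]
      simp
    | succ b ih =>
      by_cases hb : b = 0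
      · subst hb
        rw [PySem.List.pyRange_one_eq_nil (by norm_num)]
        simp
      · have h1b : (1 : Int) ≤ (b : Int) := by exact_mod_cast Nat.one_le_iff_ne_zero.mpr hb
        have hcast : ((b + 1 : Nat) : Int) = (b : Int) + 1 := by push_cast; ring
        rw [hcast, PySem.List.pyRange_one_succ_right h1b, List.map_append,
          List.sum_append, ih, Finset.sum_Ico_succ_top (by omega)]
        simp only [List.map_cons, List.map_nil, List.sum_cons, List.sum_nil, add_zero]
        have hmod : (PySem.Int.mod n (b : Int) = 0) ↔ b ∣ n.toNat := by
          rw [PySem.Int.mod_eq_zero_iff_dvd]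
          have hm : ((n.toNat : Nat) : Int) = n := Int.toNat_of_nonneg (by omega)
          rw [← hm]
          exact Int.natCast_dvd_natCast
        by_cases hdvd : b ∣ n.toNat
        · rw [if_pos (hmod.mpr hdvd), if_pos hdvd]
        · rw [if_neg (fun h => hdvd (hmod.mp h)), if_neg hdvd]
  have hn' : ((n.toNat : Nat) : Int) = n := Int.toNat_of_nonneg (by omega)
  have h := key n.toNat
  rwa [hn'] at h

-- B's loop body equals t plus the Nat-form contribution
theorem rvs_step (n d t : Int) (hd : 1 ≤ d) (hn : 1 ≤ n) :
    (if PySem.Int.mod n d = 0 then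
      if PySem.Int.floordiv n d ≠ d ∧ PySem.Int.floordiv n d < n then
        (if d < n then t + d else t) + PySem.Int.floordiv n d
      else (if d < n then t + d else t)
     else t) = t + rvsG n.toNat d.toNat := by
  obtain ⟨a, rfl⟩ : ∃ a : Nat, (a : Int) = d := ⟨d.toNat, Int.toNat_of_nonneg (by omega)⟩
  obtain ⟨m, rfl⟩ : ∃ m : Nat, (m : Int) = n := ⟨n.toNat, Int.toNat_of_nonneg (by omega)⟩
  have ha : 0 < a := by exact_mod_cast hd
  simp only [PySem.Int.floordiv_eq_ediv_of_pos (show (0:Int) < (a:Int) by exact_mod_cast ha),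
    PySem.Int.mod_eq_zero_iff_dvd, ← Int.natCast_div, Int.toNat_natCast, rvsG,
    Int.natCast_dvd_natCast, Nat.cast_lt, ne_eq, Nat.cast_inj]
  split_ifs <;> omega

-- past √n the remaining Icc is empty
theorem rvs_tail (n d t : Int) (hd : 1 ≤ d) (hn : 1 ≤ n) (h : ¬ d * d ≤ n) :
    t = t + ∑ k ∈ Finset.Icc d.toNat (Nat.sqrt n.toNat), rvsG n.toNat k := by
  have hda : (d.toNat : Int) = d := Int.toNat_of_nonneg (by omega)
  have hna : (n.toNat : Int) = n := Int.toNat_of_nonneg (by omega)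
  have h2 : (n.toNat : Int) < (d.toNat : Int) * (d.toNat : Int) := by
    rw [hna, hda]; exact not_le.mp h
  have hlt : Nat.sqrt n.toNat < d.toNat := Nat.sqrt_lt.mpr (by exact_mod_cast h2)
  rw [Finset.Icc_eq_empty (by omega), Finset.sum_empty, add_zero]

-- characterization of B's loop as a Finset sum
theorem rvsB_char (n : Int) (hn : 1 ≤ n) :
    ∀ (j : Nat) (d t : Int), 1 ≤ d → (n + 1 - d).toNat ≤ j →
      rvsAltLoop n d t = t + ∑ k ∈ Finset.Icc d.toNat (Nat.sqrt n.toNat), rvsG n.toNat k := by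
  intro j
  induction j with
  | zero =>
    intro d t hd hj
    have hd' : n + 1 ≤ d := by omega
    have hnd : ¬ d * d ≤ n := by nlinarith [mul_self_nonneg (d - 1)]
    rw [rvsAltLoop, dif_neg hnd]
    exact rvs_tail n d t hd hn hnd
  | succ j ih =>
    intro d t hd hj
    rw [rvsAltLoop]
    by_cases h : d * d ≤ n
    · rw [dif_pos h]
      have hdn : d ≤ n := by nlinarith [mul_self_nonneg (d - 1), mul_self_nonneg d]
      have hrec := ih (d + 1)
        (if PySem.Int.mod n d = 0 then
          if PySem.Int.floordiv n d ≠ d ∧ PySem.Int.floordiv n d < n then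
            (if d < n then t + d else t) + PySem.Int.floordiv n d
          else (if d < n then t + d else t)
         else t) (by omega) (by omega)
      simp only []
      rw [hrec, rvs_step n d t hd hn]
      have hda : (d.toNat : Int) = d := Int.toNat_of_nonneg (by omega)
      have hds : d.toNat ≤ Nat.sqrt n.toNat := by
        apply Nat.le_sqrt.mpr
        have h2 : (d.toNat : Int) * (d.toNat : Int) ≤ ((n.toNat : Nat) : Int) := by
          rw [hda, Int.toNat_of_nonneg (by omega : (0:Int) ≤ n)]; exact h
        exact_mod_cast h2
      have hd1 : (d + 1).toNat = d.toNat + 1 := by omega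
      have hins : Finset.Icc d.toNat (Nat.sqrt n.toNat)
          = insert d.toNat (Finset.Icc (d.toNat + 1) (Nat.sqrt n.toNat)) := by
        ext x; simp only [Finset.mem_Icc, Finset.mem_insert]; omega
      rw [hd1, hins, Finset.sum_insert (by simp), add_assoc]
    · rw [dif_neg h]
      exact rvs_tail n d t hd hn h

-- the √n pairing: proper-divisor sum as a sum over divisors up to √m
theorem rvs_pair (m : Nat) (hm : 1 ≤ m) :
    ∑ x ∈ Finset.Ico 1 m, (if x ∣ m then (x : Int) else 0)
    = ∑ d ∈ Finset.Icc 1 (Nat.sqrt m), rvsG m d := by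
  have hs : Nat.sqrt m * Nat.sqrt m ≤ m := Nat.sqrt_le m
  have hlt : m < (Nat.sqrt m + 1) * (Nat.sqrt m + 1) := Nat.lt_succ_sqrt m
  have hspos : 0 < Nat.sqrt m := Nat.sqrt_pos.mpr hm
  set s := Nat.sqrt m with hsdef
  have hR : ∑ d ∈ Finset.Icc 1 s, rvsG m d
      = (∑ d ∈ (Finset.Icc 1 s).filter (· ∣ m), (if d < m then (d : Int) else 0))
        + ∑ d ∈ (Finset.Icc 1 s).filter (· ∣ m),
            (if ¬(m / d = d) ∧ m / d < m then ((m / d : Nat) : Int) else 0) := by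
    rw [← Finset.sum_add_distrib, Finset.sum_filter]
    exact Finset.sum_congr rfl (fun d _ => by simp [rvsG])
  rw [← Finset.sum_filter, hR,
    ← Finset.sum_filter_add_sum_filter_not ((Finset.Ico 1 m).filter (· ∣ m))
      (fun x => x ≤ s) (fun x => (x : Int))]
  congr 1
  · -- small divisors, identity map
    have h1 : ∑ d ∈ (Finset.Icc 1 s).filter (· ∣ m), (if d < m then (d : Int) else 0)
        = ∑ d ∈ ((Finset.Icc 1 s).filter (· ∣ m)).filter (· < m), (d : Int) :=
      (Finset.sum_filter _ _).symm
    have hset : ((Finset.Icc 1 s).filter (· ∣ m)).filter (· < m)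
        = ((Finset.Ico 1 m).filter (· ∣ m)).filter (fun x => x ≤ s) := by
      ext x
      simp only [Finset.mem_filter, Finset.mem_Ico, Finset.mem_Icc]
      constructor
      · rintro ⟨⟨⟨a1, a2⟩, a3⟩, a4⟩; exact ⟨⟨⟨a1, a4⟩, a3⟩, a2⟩
      · rintro ⟨⟨⟨a1, a2⟩, a3⟩, a4⟩; exact ⟨⟨⟨a1, a4⟩, a3⟩, a2⟩
    rw [h1, hset]
  · -- large divisors x ↔ small cofactors d = m / x
    have h2 : ∑ d ∈ (Finset.Icc 1 s).filter (· ∣ m),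
          (if ¬(m / d = d) ∧ m / d < m then ((m / d : Nat) : Int) else 0)
        = ∑ d ∈ ((Finset.Icc 1 s).filter (· ∣ m)).filter
            (fun d => ¬(m / d = d) ∧ m / d < m), ((m / d : Nat) : Int) :=
      (Finset.sum_filter _ _).symm
    rw [h2]
    symm
    apply Finset.sum_nbij' (i := fun d => m / d) (j := fun x => m / x)
    · -- hi : maps into the high-divisor set
      intro d hd
      simp only [Finset.mem_filter, Finset.mem_Icc, Finset.mem_Ico] at hd ⊢
      obtain ⟨⟨⟨h1, h2'⟩, h3⟩, h4, h5⟩ := hd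
      have hdm : d ≤ m := le_trans h2' (Nat.sqrt_le_self m)
      refine ⟨⟨⟨(Nat.one_le_div_iff h1).mpr hdm, h5⟩, Nat.div_dvd_of_dvd h3⟩, ?_⟩
      intro hqs
      have hqd : m / d * d = m := Nat.div_mul_cancel h3
      rcases Nat.lt_or_ge (m / d) d with hc | hc
      · nlinarith
      · have hc' : d < m / d := lt_of_le_of_ne hc (fun e => h4 e.symm)
        nlinarith
    · -- hj : inverse maps back into the small-cofactor set
      intro x hx
      simp only [Finset.mem_filter, Finset.mem_Icc, Finset.mem_Ico] at hx ⊢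
      obtain ⟨⟨⟨h1, h2'⟩, h3⟩, h4⟩ := hx
      have hm0 : m ≠ 0 := by omega
      have hxs : s < x := Nat.lt_of_not_le h4
      have hds : m / x ≤ s := by
        have hlt2 : m / x < s + 1 := by
          apply (Nat.div_lt_iff_lt_mul h1).mpr
          calc m < (s + 1) * (s + 1) := hlt
          _ ≤ (s + 1) * x := Nat.mul_le_mul_left _ hxs
        omega
      have hmx : m / (m / x) = x := Nat.div_div_self h3 hm0
      refine ⟨⟨⟨(Nat.one_le_div_iff h1).mpr (le_of_lt h2'), hds⟩, Nat.div_dvd_of_dvd h3⟩, ?_, ?_⟩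
      · rw [hmx]; omega
      · rw [hmx]; exact h2'
    · -- left inverse
      intro d hd
      simp only [Finset.mem_filter, Finset.mem_Icc] at hd
      exact Nat.div_div_self hd.1.2 (by omega)
    · -- right inverse
      intro x hx
      simp only [Finset.mem_filter, Finset.mem_Ico] at hx
      exact Nat.div_div_self hx.1.2 (by omega)
    · -- values agree
      intro d _
      rfl

-- the two summation strategies agree
theorem rvs_core : ∀ (n ps : Int),
    (PySem.List.pyRange 1 n 1).foldl
      (fun acc x => if PySem.Int.mod n x = 0 then acc + x else acc) ps
    = rvsAltLoop n 1 ps := by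
  intro n ps
  by_cases hn : n ≤ 0
  · rw [PySem.List.pyRange_one_eq_nil (by omega)]
    rw [rvsAltLoop, dif_neg (by norm_num; omega)]
    simp
  · have hn1 : 1 ≤ n := by omega
    have h1 := rvsB_char n hn1 (n + 1 - 1).toNat 1 ps (le_refl 1) (le_refl _)
    rw [rvsA_sum, rvsA_finset n hn1, h1]
    have ht : ((1 : Int)).toNat = 1 := rfl
    rw [ht, rvs_pair n.toNat (by omega)]

-- ===== VERDICT (by name: the statement is the Claim_ definition above) =====
theorem returnValueSum_spec : Claim_equal_returnValueSum := by
  intro m n ps _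
  unfold Spec_returnValueSum returnValueSum returnValueSum_alt
  simp only []
  rw [rvs_core]
  cases hb : (m == rvsAltLoop n 1 ps) <;> simp
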